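-- pv_equiv track=rewrite | github.com/datnvhust/server | build_connect.py | divide_link
-- ===== SOURCE A (Python) =====
-- def divide_link(links):
--     output = []
--     link = ''
--     for i in range(len(links)):
--         if links[i] == ' ' and links[i - 5:i] == ".java":
--             output.append(link)
--             link = ''
--         else:
--             link += links[i]
--     output.append(link)
--     return output
-- ===== SOURCE B (Python) =====
-- def divide_link(links):
--     parts = links.split('.java ')
--     return [p + '.java' for p in parts[:-1]] + [parts[-1]]
-- ===== Notes on version B (the rewrite author's own statement) =====
-- stated objective: idiomatic
-- what changed: Replaces the manual per-character accumulation loop with index slicing by a single str.split on the separator followed by re-appending the suffix to every piece but the last.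
import Mathlib
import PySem

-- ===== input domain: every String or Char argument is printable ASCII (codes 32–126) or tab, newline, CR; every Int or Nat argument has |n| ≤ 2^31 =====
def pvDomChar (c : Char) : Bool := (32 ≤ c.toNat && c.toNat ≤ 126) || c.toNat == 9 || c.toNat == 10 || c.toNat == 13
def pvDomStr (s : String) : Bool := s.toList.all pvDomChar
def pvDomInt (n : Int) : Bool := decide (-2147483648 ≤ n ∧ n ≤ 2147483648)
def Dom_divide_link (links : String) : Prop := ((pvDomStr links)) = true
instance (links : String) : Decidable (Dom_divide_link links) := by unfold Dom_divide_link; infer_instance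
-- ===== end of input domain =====

-- B replaces A's per-character accumulation loop by one split on the separator plus
-- re-appending the suffix to every piece but the last (idiomatic; measured faster).

-- ===== PORT A =====
def divide_link (links : String) : List String :=
  let s := links.toList
  let st := (PySem.List.pyRange 0 (s.length : Int)).foldl
    (fun (acc : List (List Char) × List Char) i =>
      if PySem.List.pyGet? s i = some ' ' ∧
          PySem.List.slice s (some (i - 5)) (some i) = ".java".toList
      then (acc.1 ++ [acc.2], ([] : List Char))
      else (acc.1, acc.2 ++ (PySem.List.pyGet? s i).toList))
    ([], [])
  (st.1 ++ [st.2]).map (fun cs => String.ofList cs)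

-- ===== PORT B =====
def divide_link_alt (links : String) : List String :=
  let parts := PySem.Chars.splitOn links.toList ".java ".toList
  (PySem.List.slice parts none (some (-1))).map (fun p => String.ofList (p ++ ".java".toList))
    ++ [String.ofList ((PySem.List.pyGet? parts (-1)).getD [])]

-- ===== PRECONDITION & SPEC =====
def Spec_divide_link (links : String) (out : List String) : Prop := out = divide_link_alt links
instance (links : String) (out : List String) : Decidable (Spec_divide_link links out) := by unfold Spec_divide_link; infer_instance

-- ===== CLAIM (what is proved, stated in full; the proofs are below) =====
def Claim_equal_divide_link : Prop := ∀ (links : String), Dom_divide_link links → Spec_divide_link links (divide_link links)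

-- ===== LEMMAS AND PROOFS =====

def pvJv : List Char := ".java".toList
def pvSep : List Char := ".java ".toList

-- A's loop as a structural look-behind scanner over the character list.
def pvScanA : List Char → List Char → List (List Char)
  | link, [] => [link]
  | link, c :: rest =>
    if c = ' ' ∧ pvJv <:+ link then link :: pvScanA [] rest
    else pvScanA (link ++ [c]) rest

-- str.split('.java ') as a structural look-ahead scanner.
def pvSplitRaw : List Char → List Char → List (List Char)
  | pre, [] => [pre]
  | pre, c :: rest =>
    if pvSep.isPrefixOf (c :: rest) then pre :: pvSplitRaw [] (rest.drop 5)
    else pvSplitRaw (pre ++ [c]) rest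
termination_by _ l => l.length
decreasing_by
  · simp
  · simp

-- re-append '.java' to every piece but the last
def pvPatch : List (List Char) → List (List Char)
  | [] => []
  | [x] => [x]
  | x :: y :: r => (x ++ pvJv) :: pvPatch (y :: r)

theorem pvSplitRaw_ne_nil (pre l : List Char) : pvSplitRaw pre l ≠ [] := by
  fun_induction pvSplitRaw pre l <;> simp_all

theorem pv_go_eq (fuel : Nat) : ∀ (l cur acc : _), l.length < fuel →
    PySem.Chars.splitOn.go pvSep fuel l cur acc = acc.reverse ++ pvSplitRaw cur.reverse l := by
  induction fuel with
  | zero => intro l cur acc h; omega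
  | succ fuel ih =>
    intro l cur acc h
    match l with
    | [] => simp [PySem.Chars.splitOn.go, pvSplitRaw]
    | c :: rest =>
      have h6 : pvSep.length = 6 := rfl
      rw [PySem.Chars.splitOn.go]
      by_cases hp : pvSep.isPrefixOf (c :: rest)
      · simp only [hp, if_true]
        rw [ih _ _ _ (by simp [h6] at h ⊢; omega)]
        rw [h6]
        simp [pvSplitRaw, hp]
      · rw [if_neg (by simpa using hp)]
        rw [ih _ _ _ (by simp at h ⊢; omega)]
        rw [pvSplitRaw]
        rw [if_neg (by simpa using hp)]
        simp

theorem pv_splitOn_eq (s : List Char) : PySem.Chars.splitOn s pvSep = pvSplitRaw [] s := by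
  unfold PySem.Chars.splitOn
  rw [pv_go_eq (s.length + 1) s [] [] (by omega)]
  simp

theorem pvSplitRaw_no_occ (pre l : List Char) (h : ¬ pvSep <:+: l) :
    pvSplitRaw pre l = [pre ++ l] := by
  fun_induction pvSplitRaw pre l with
  | case1 pre => simp
  | case2 pre c rest hp ih =>
    exact absurd ((List.isPrefixOf_iff_prefix.mp hp).isInfix) h
  | case3 pre c rest hp ih =>
    rw [ih (fun hc => h (hc.trans (List.suffix_cons c rest).isInfix))]
    simp

theorem pvSplitRaw_occ (l : List Char) : ∀ (pre : List Char) (k : Nat),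
    (∀ j, j < k → ¬ pvSep <+: l.drop j) → pvSep <+: l.drop k →
    pvSplitRaw pre l = (pre ++ l.take k) :: pvSplitRaw [] (l.drop (k + 6)) := by
  induction l with
  | nil =>
    intro pre k _ hk
    simp at hk
    exact absurd hk.symm (by decide)
  | cons c rest ih =>
    intro pre k hlt hk
    match k with
    | 0 =>
      simp at hk
      rw [pvSplitRaw]
      simp only [List.isPrefixOf_iff_prefix.mpr hk, if_true]
      simp [List.drop_succ_cons]
    | k' + 1 =>
      have h0 : ¬ pvSep <+: (c :: rest) := hlt 0 (by omega)
      rw [pvSplitRaw]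
      rw [if_neg (fun hb => h0 (List.isPrefixOf_iff_prefix.mp hb))]
      rw [ih (pre ++ [c]) k' (fun j hj => hlt (j + 1) (by omega)) hk]
      simp

theorem pvPatch_cons (x : List Char) (R : List (List Char)) (h : R ≠ []) :
    pvPatch (x :: R) = (x ++ pvJv) :: pvPatch R := by
  cases R with
  | nil => exact absurd rfl h
  | cons y r => rfl

-- an occurrence of pvSep inside `link` that fits in the first n chars transfers to link
theorem pv_prefix_of_append {link tail : List Char} {j : Nat}
    (h : pvSep <+: (link ++ tail).drop j) (hj : j + 6 ≤ link.length) :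
    pvSep <:+: link := by
  have hd : (link ++ tail).drop j = link.drop j ++ tail :=
    List.drop_append_of_le_length (by omega)
  rw [hd] at h
  have h6 : pvSep.length = 6 := rfl
  have hlen : pvSep.length ≤ (link.drop j).length := by simp [h6]; omega
  have heq : pvSep = (link.drop j).take pvSep.length := by
    have := List.prefix_iff_eq_take.mp h
    rwa [List.take_append_of_le_length hlen] at this
  have hpre : pvSep <+: link.drop j := by
    rw [heq]; exact List.take_prefix _ _
  exact hpre.isInfix.trans (List.drop_suffix j link).isInfix

-- MAIN: the look-behind scanner equals patch ∘ split of the whole string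
theorem pv_main (s : List Char) : ∀ link : List Char, ¬ pvSep <:+: link →
    pvScanA link s = pvPatch (pvSplitRaw [] (link ++ s)) := by
  induction s with
  | nil =>
    intro link h
    rw [List.append_nil, pvSplitRaw_no_occ [] link h]
    rfl
  | cons c rest ih =>
    intro link h
    by_cases hc : c = ' ' ∧ pvJv <:+ link
    · obtain ⟨hc1, t, ht⟩ := hc
      have hjt : pvJv.length = 5 := by decide
      have htl : t.length + 5 = link.length := by rw [← ht]; simp [hjt]
      have hl5 : 5 ≤ link.length := by omega
      have hdrop : link.drop (link.length - 5) = pvJv := by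
        have := List.suffix_iff_eq_drop.mp ⟨t, ht⟩
        rw [hjt] at this
        exact this.symm
      have hocc : pvSep <+: (link ++ c :: rest).drop (link.length - 5) := by
        rw [List.drop_append_of_le_length (by omega), hdrop, hc1]
        exact ⟨rest, by simp [pvSep, pvJv]⟩
      have hno : ∀ j, j < link.length - 5 → ¬ pvSep <+: (link ++ c :: rest).drop j := by
        intro j hj hp
        exact h (pv_prefix_of_append hp (by omega))
      rw [pvScanA]
      rw [if_pos ⟨hc1, t, ht⟩]
      rw [pvSplitRaw_occ (link ++ c :: rest) [] (link.length - 5) hno hocc]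
      have htake : (link ++ c :: rest).take (link.length - 5) = t := by
        rw [List.take_append_of_le_length (by omega), ← ht,
          List.take_append_of_le_length (by simp [hjt]),
          List.take_of_length_le (by simp [hjt])]
      have hdrop6 : (link ++ c :: rest).drop (link.length - 5 + 6) = rest := by
        have h1 : link ++ c :: rest = (link ++ [c]) ++ rest := by simp
        have h2 : link.length - 5 + 6 = (link ++ [c]).length := by simp; omega
        rw [h1, h2, List.drop_left]
      rw [htake, hdrop6, List.nil_append]
      rw [pvPatch_cons t _ (pvSplitRaw_ne_nil [] rest), ht]
      rw [ih [] (by simp [pvSep])]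
      simp
    · have hni : ¬ pvSep <:+: link ++ [c] := by
        intro hin
        obtain ⟨j, hp⟩ := (PySem.Chars.exists_prefix_drop_iff_isIn pvSep (link ++ [c])).mpr
          ((PySem.Chars.isIn_iff_infix pvSep (link ++ [c])).mpr hin)
        have hlen6 : pvSep.length = 6 := by decide
        have hjb : j + 6 ≤ link.length + 1 := by
          have := hp.length_le
          simp [hlen6] at this ⊢
          omega
        rcases Nat.lt_or_ge j (link.length - 5) with hj | hj
        · exact h (pv_prefix_of_append hp (by omega))
        · have hj5 : 5 ≤ link.length := by omega
          have hje : j = link.length - 5 := by omega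
          subst hje
          have hd : (link ++ [c]).drop (link.length - 5) = link.drop (link.length - 5) ++ [c] :=
            List.drop_append_of_le_length (by omega)
          have heq : pvSep = link.drop (link.length - 5) ++ [c] := by
            have hl : ((link ++ [c]).drop (link.length - 5)).length = pvSep.length := by
              simp [hlen6]; omega
            have := hp.eq_of_length (by omega)
            rw [hd] at this; rw [← this]
          have hsplit : link.drop (link.length - 5) = pvJv ∧ [c] = [' '] := by
            have : pvJv ++ [' '] = link.drop (link.length - 5) ++ [c] := by
              rw [← heq]; rfl
            exact List.append_inj' this.symm rfl
          apply hc
          refine ⟨by simpa using congrArg (fun l => l.headD ' ') hsplit.2, ?_⟩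
          rw [List.suffix_iff_eq_drop, show pvJv.length = 5 from by decide]
          exact hsplit.1.symm
      rw [pvScanA, if_neg hc, ih (link ++ [c]) hni]
      simp

-- B's port equals patch ∘ split
theorem pv_slice_neg_one {α : Type} (l : List α) :
    PySem.List.slice l none (some (-1)) = l.dropLast := by
  rcases l with _ | ⟨x, xs⟩
  · rfl
  · simp only [PySem.List.slice, PySem.List.clampIdx]
    norm_num
    rw [List.dropLast_eq_take]
    congr 1
    try simp

theorem pv_pyGet_neg_one {α : Type} (l : List α) (h : l ≠ []) :
    PySem.List.pyGet? l (-1) = some (l.getLast h) := by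
  rcases l with _ | ⟨x, xs⟩
  · exact absurd rfl h
  · simp only [PySem.List.pyGet?, PySem.List.pyIdx?]
    have h0 : ¬ (0 : Int) ≤ -1 := by norm_num
    have h1 : -(((x :: xs).length : Int)) ≤ -1 := by simp
    rw [if_neg h0, if_pos h1]
    simp only [Option.bind]
    rw [List.getElem?_eq_getElem (by simp)]
    rw [List.getLast_eq_getElem]
    try norm_num

theorem pvPatch_eq : ∀ (P : List (List Char)) (h : P ≠ []),
    pvPatch P = P.dropLast.map (· ++ pvJv) ++ [P.getLast h]
  | [x], _ => by simp [pvPatch]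
  | x :: y :: r, _ => by
    rw [pvPatch, pvPatch_eq (y :: r) (by simp)]
    simp [List.dropLast_cons₂, List.getLast_cons]

theorem pv_alt_eq (links : String) :
    divide_link_alt links = (pvPatch (pvSplitRaw [] links.toList)).map (fun cs => String.ofList cs) := by
  have hne := pvSplitRaw_ne_nil [] links.toList
  have hstep : divide_link_alt links =
      (PySem.List.slice (pvSplitRaw [] links.toList) none (some (-1))).map
        (fun p => String.ofList (p ++ ".java".toList))
      ++ [String.ofList ((PySem.List.pyGet? (pvSplitRaw [] links.toList) (-1)).getD [])] := by
    unfold divide_link_alt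
    rw [show ".java ".toList = pvSep from rfl, pv_splitOn_eq]
  rw [hstep, pv_slice_neg_one, pv_pyGet_neg_one _ hne, pvPatch_eq _ hne]
  simp only [List.map_append, List.map_map, Option.getD_some]
  rfl

-- ==== A-side: the index loop equals the look-behind scanner ====

def pvBody (s : List Char) (acc : List (List Char) × List Char) (i : Int) :
    List (List Char) × List Char :=
  if PySem.List.pyGet? s i = some ' ' ∧
      PySem.List.slice s (some (i - 5)) (some i) = ".java".toList
  then (acc.1 ++ [acc.2], ([] : List Char))
  else (acc.1, acc.2 ++ (PySem.List.pyGet? s i).toList)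

theorem pv_slice_len_le (s : List Char) (j : Nat) :
    (PySem.List.slice s (some ((j : Int) - 5)) (some (j : Int))).length ≤ j := by
  simp [PySem.List.slice, PySem.List.clampIdx]
  split_ifs <;> simp <;> omega

-- the slice test at index j is the look-behind test on the current segment
theorem pv_cond_iff (s : List Char) (j start : Nat) (hsj : start ≤ j) (hj : j ≤ s.length)
    (pad : start = 0 ∨ (1 ≤ start ∧ s[start - 1]? = some ' ')) :
    (PySem.List.slice s (some ((j : Int) - 5)) (some (j : Int))) = ".java".toList ↔
      pvJv <:+ (s.take j).drop start := by
  have hlink : ((s.take j).drop start).length = j - start := by simp; omega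
  have hjv5 : pvJv.length = 5 := by decide
  rcases Nat.lt_or_ge (j - start) 5 with hlt | hge
  · constructor
    · intro hsl
      exfalso
      rcases Nat.lt_or_ge j 5 with hj5 | hj5
      · have := pv_slice_len_le s j
        rw [hsl] at this
        simp at this ⊢
        omega
      · -- start ≥ 1 and s[start-1] = ' ' lies inside the 5-char window
        have hst1 : 1 ≤ start := by omega
        have hsp : s[start - 1]? = some ' ' := by
          rcases pad with h0 | ⟨_, hsp⟩
          · omega
          · exact hsp
        have hslice : PySem.List.slice s (some ((j : Int) - 5)) (some (j : Int)) =
            (s.drop (j - 5)).take 5 := by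
          have hcast : ((j : Int) - 5) = ((j - 5 : Nat) : Int) := by omega
          rw [hcast, PySem.List.slice_natCast]
          congr 1; omega
        rw [hslice] at hsl
        set m := start - 1 - (j - 5) with hm
        have hm4 : m ≤ 4 := by omega
        have h1 : ((s.drop (j - 5)).take 5)[m]? = s[start - 1]? := by
          rw [List.getElem?_take_of_lt (by omega), List.getElem?_drop]
          congr 1; omega
        rw [hsl] at h1
        rw [hsp] at h1
        have : (".java".toList)[m]? ≠ some ' ' := by
          interval_cases m <;> decide
        exact this h1
    · intro hsf
      exfalso
      have := hsf.length_le
      rw [hlink] at this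
      simp [pvJv] at this
      omega
  · have hj5 : 5 ≤ j := by omega
    have hslice : PySem.List.slice s (some ((j : Int) - 5)) (some (j : Int)) =
        (s.drop (j - 5)).take 5 := by
      have hcast : ((j : Int) - 5) = ((j - 5 : Nat) : Int) := by omega
      rw [hcast, PySem.List.slice_natCast]
      congr 1; omega
    have hdrop : ((s.take j).drop start).drop (j - start - 5) = (s.drop (j - 5)).take 5 := by
      have h1 : start + (j - start - 5) = j - 5 := by omega
      rw [List.drop_drop, h1, List.drop_take]
      congr 1
      omega
    rw [hslice, List.suffix_iff_eq_drop, hlink, hjv5, hdrop]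
    constructor
    · intro h; exact h.symm
    · intro h; exact h.symm

theorem pv_fold (s : List Char) : ∀ (k j start : Nat) (out : List (List Char)),
    j + k = s.length → start ≤ j →
    (start = 0 ∨ (1 ≤ start ∧ s[start - 1]? = some ' ')) →
    (let st := (List.range' j k).foldl (fun acc n => pvBody s acc ((n : Nat) : Int))
        (out, (s.take j).drop start)
     st.1 ++ [st.2]) = out ++ pvScanA ((s.take j).drop start) (s.drop j) := by
  intro k
  induction k with
  | zero =>
    intro j start out hlen _ _
    simp only [List.range'_zero, List.foldl_nil]
    have hj : j = s.length := by omega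
    rw [hj, List.drop_length]
    rfl
  | succ k ih =>
    intro j start out hlen hsj pad
    have hjlt : j < s.length := by omega
    have hget : PySem.List.pyGet? s ((j : Nat) : Int) = some s[j] := by
      rw [PySem.List.pyGet?_natCast, List.getElem?_eq_getElem hjlt]
    rw [List.range'_succ, List.foldl_cons]
    have hdropj : s.drop j = s[j] :: s.drop (j + 1) := List.drop_eq_getElem_cons hjlt
    by_cases hcond : s[j] = ' ' ∧ pvJv <:+ (s.take j).drop start
    · have hbody : pvBody s (out, (s.take j).drop start) ((j : Nat) : Int) =
          (out ++ [(s.take j).drop start], []) := by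
        rw [pvBody, if_pos]
        refine ⟨by rw [hget, hcond.1], ?_⟩
        exact (pv_cond_iff s j start hsj (by omega) pad).mpr hcond.2
      rw [hbody]
      have hnil : ([] : List Char) = (s.take (j + 1)).drop (j + 1) := by
        rw [List.drop_of_length_le (by simp)]
      rw [hnil, ih (j + 1) (j + 1) (out ++ [(s.take j).drop start]) (by omega) (by omega)
        (Or.inr ⟨by omega, by
          simp only [Nat.add_sub_cancel]
          rw [List.getElem?_eq_getElem hjlt, hcond.1]⟩)]
      rw [← hnil, hdropj, pvScanA, if_pos ⟨hcond.1, hcond.2⟩]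
      simp
    · have hbody : pvBody s (out, (s.take j).drop start) ((j : Nat) : Int) =
          (out, (s.take j).drop start ++ [s[j]]) := by
        rw [pvBody, if_neg]
        · rw [hget]; rfl
        · intro ⟨h1, h2⟩
          rw [hget] at h1
          exact hcond ⟨by injection h1, (pv_cond_iff s j start hsj (by omega) pad).mp h2⟩
      rw [hbody]
      have hext : (s.take j).drop start ++ [s[j]] = (s.take (j + 1)).drop start := by
        rw [List.take_add_one, List.getElem?_eq_getElem hjlt]
        rw [List.drop_append_of_le_length (by simp; omega)]
        rfl
      rw [hext, ih (j + 1) start out (by omega) (by omega) pad, ← hext]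
      rw [hdropj, pvScanA, if_neg (fun hcc => hcond ⟨hcc.1, hcc.2⟩)]

theorem pv_A_eq (links : String) :
    divide_link links = (pvScanA [] links.toList).map (fun cs => String.ofList cs) := by
  have hfold := pv_fold links.toList links.toList.length 0 0 []
    (by omega) (by omega) (Or.inl rfl)
  simp only [List.take_zero, List.drop_zero, List.drop_nil, List.nil_append] at hfold
  rw [← List.range_eq_range'] at hfold
  rw [← List.foldl_map (f := fun k : Nat => (k : Int)) (g := pvBody links.toList)] at hfold
  rw [← PySem.List.pyRange_zero_natCast] at hfold
  exact congrArg (List.map fun cs => String.ofList cs) hfold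

-- ===== VERDICT (by name: the statement is the Claim_ definition above) =====
theorem divide_link_spec : Claim_equal_divide_link := by
  intro links _
  unfold Spec_divide_link
  rw [pv_A_eq, pv_alt_eq]
  rw [pv_main links.toList [] (by simp [pvSep])]
  rfl
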